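-- pv_equiv track=rewrite | github.com/Saketneco/Neco-Projects | Project-2(Mail Automation)/Code/Mail_code_Oracle_part2.py | generate_birthday_cards
-- ===== SOURCE A (Python) =====
-- def generate_birthday_cards(birthday_data):
--     birthday_cards = ""
--     for index, person in enumerate(birthday_data):
--         card_html = f"""
--             <div style="margin: 10px; padding: 10px; background-color: rgba(255, 255, 255, 0.2); border-radius: 10px; width: 180px; text-align: center;">
--                 <h3 style="color: #FFD700;">SHRI {person[0].replace("SHRI","")}</h3>
--                 <p style="color: #ECF0F1;">{ person[2] }<br><br>-</p>
--             </div>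
--         """
--         birthday_cards += card_html
--
--         if (index + 1) % 5 == 0 and index + 1 != len(birthday_data):
--             birthday_cards += "</div><div style='display: flex; flex-wrap: wrap; justify-content: center;align-items: center; text-align: center;'>"
--
--     return birthday_cards
-- ===== SOURCE B (Python) =====
-- _DIVIDER = "</div><div style='display: flex; flex-wrap: wrap; justify-content: center;align-items: center; text-align: center;'>"
--
--
-- def _card(person):
--     return f"""
--             <div style="margin: 10px; padding: 10px; background-color: rgba(255, 255, 255, 0.2); border-radius: 10px; width: 180px; text-align: center;">
--                 <h3 style="color: #FFD700;">SHRI {person[0].replace("SHRI","")}</h3>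
--                 <p style="color: #ECF0F1;">{ person[2] }<br><br>-</p>
--             </div>
--         """
--
--
-- def _render(cards):
--     if len(cards) <= 5:
--         return "".join(cards)
--     return "".join(cards[:5]) + _DIVIDER + _render(cards[5:])
--
--
-- def generate_birthday_cards(birthday_data):
--     return _render([_card(p) for p in birthday_data])
-- ===== Notes on version B (the rewrite author's own statement) =====
-- stated objective: alternative
-- what changed: B maps each person to its card string by a comprehension and then renders rows by recursive 5-chunking (concatenate a chunk, join chunks with the divider), replacing A's single indexed accumulation loop with a modulo-and-length divider test.
import Mathlib
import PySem

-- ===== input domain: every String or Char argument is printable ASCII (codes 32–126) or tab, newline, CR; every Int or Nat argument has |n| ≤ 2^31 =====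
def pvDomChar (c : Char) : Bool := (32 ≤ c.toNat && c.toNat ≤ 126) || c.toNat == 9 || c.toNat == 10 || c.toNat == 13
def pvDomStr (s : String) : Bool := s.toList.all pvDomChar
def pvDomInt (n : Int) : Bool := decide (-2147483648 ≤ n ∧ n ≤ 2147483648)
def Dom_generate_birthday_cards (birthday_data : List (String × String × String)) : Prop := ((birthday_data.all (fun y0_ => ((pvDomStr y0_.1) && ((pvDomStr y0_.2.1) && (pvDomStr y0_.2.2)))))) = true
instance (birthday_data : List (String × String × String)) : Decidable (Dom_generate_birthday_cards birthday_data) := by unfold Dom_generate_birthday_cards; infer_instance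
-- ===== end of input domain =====

-- B builds each card by a comprehension and renders rows by recursive 5-chunking joined with the
-- divider, instead of A's indexed accumulation with a modulo test (objective: simpler decomposition).

-- ===== PORT A =====
def pvDividerA : String := "</div><div style='display: flex; flex-wrap: wrap; justify-content: center;align-items: center; text-align: center;'>"

def pvCardA (person : String × String × String) : String :=
  "\n            <div style=\"margin: 10px; padding: 10px; background-color: rgba(255, 255, 255, 0.2); border-radius: 10px; width: 180px; text-align: center;\">\n                <h3 style=\"color: #FFD700;\">SHRI "
    ++ PySem.Str.replace person.1 "SHRI" ""
    ++ "</h3>\n                <p style=\"color: #ECF0F1;\">"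
    ++ person.2.2
    ++ "<br><br>-</p>\n            </div>\n        "

-- loop body of A (index + person → updated accumulator); n is len(birthday_data)
def pvStepA (n : Int) (birthday_cards : String) (ip : Int × (String × String × String)) : String :=
  let card_html := pvCardA ip.2
  let birthday_cards := birthday_cards ++ card_html
  if PySem.Int.mod (ip.1 + 1) 5 == 0 && ip.1 + 1 != n then birthday_cards ++ pvDividerA
  else birthday_cards

def generate_birthday_cards (birthday_data : List (String × String × String)) : String :=
  (PySem.List.enumerate birthday_data).foldl (pvStepA (birthday_data.length : Int)) ""

-- ===== PORT B =====
def pvDividerB : String := "</div><div style='display: flex; flex-wrap: wrap; justify-content: center;align-items: center; text-align: center;'>"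

def pvCardB (person : String × String × String) : String :=
  "\n            <div style=\"margin: 10px; padding: 10px; background-color: rgba(255, 255, 255, 0.2); border-radius: 10px; width: 180px; text-align: center;\">\n                <h3 style=\"color: #FFD700;\">SHRI "
    ++ PySem.Str.replace person.1 "SHRI" ""
    ++ "</h3>\n                <p style=\"color: #ECF0F1;\">"
    ++ person.2.2
    ++ "<br><br>-</p>\n            </div>\n        "

-- _render: cards[:5] / cards[5:] are slices with nonnegative bounds = take 5 / drop 5 (PySem.List.slice_to_natCast / slice_from_natCast)
def pvRender (cards : List String) : String :=
  if _h : cards.length ≤ 5 then PySem.Str.join "" cards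
  else PySem.Str.join "" (cards.take 5) ++ pvDividerB ++ pvRender (cards.drop 5)
termination_by cards.length
decreasing_by simp; omega

def generate_birthday_cards_alt (birthday_data : List (String × String × String)) : String :=
  pvRender (birthday_data.map pvCardB)

-- ===== PRECONDITION & SPEC =====
def Spec_generate_birthday_cards (birthday_data : List (String × String × String)) (out : String) : Prop := out = generate_birthday_cards_alt birthday_data
instance (birthday_data : List (String × String × String)) (out : String) : Decidable (Spec_generate_birthday_cards birthday_data out) := by unfold Spec_generate_birthday_cards; infer_instance

-- ===== CLAIM (what is proved, stated in full; the proofs are below) =====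
def Claim_equal_generate_birthday_cards : Prop := ∀ (birthday_data : List (String × String × String)), Dom_generate_birthday_cards birthday_data → Spec_generate_birthday_cards birthday_data (generate_birthday_cards birthday_data)

-- ===== LEMMAS AND PROOFS =====

theorem pvCardB_eq : pvCardB = pvCardA := rfl

theorem pvChars_join_nil_cons (x : List Char) (l : List (List Char)) :
    PySem.Chars.join [] (x :: l) = x ++ PySem.Chars.join [] l := by
  cases l with
  | nil => simp [PySem.Chars.join_singleton, PySem.Chars.join_nil]
  | cons y t => rw [PySem.Chars.join_cons_cons]; simp

theorem pvStepA_no (n : Int) (acc : String) (ip : Int × (String × String × String))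
    (h : (PySem.Int.mod (ip.1 + 1) 5 == 0 && ip.1 + 1 != n) = false) :
    pvStepA n acc ip = acc ++ pvCardA ip.2 := by
  unfold pvStepA; rw [h]; simp

theorem pvStepA_yes (n : Int) (acc : String) (ip : Int × (String × String × String))
    (h : (PySem.Int.mod (ip.1 + 1) 5 == 0 && ip.1 + 1 != n) = true) :
    pvStepA n acc ip = acc ++ pvCardA ip.2 ++ pvDividerA := by
  unfold pvStepA; rw [h]; simp

theorem pvCondF (i k : Nat) (n : Int) (h5 : i % 5 = 0) (hk : (k + 1) % 5 ≠ 0)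
    (j : Int) (hj : j = (i : Int) + k) :
    (PySem.Int.mod (j + 1) 5 == 0 && (j + 1 != n)) = false := by
  subst hj
  rw [PySem.Int.mod_eq_emod_of_pos (by norm_num)]
  have : ¬ ((i : Int) + k + 1) % 5 = 0 := by omega
  simp [this]

theorem pvCondT (i : Nat) (n : Int) (h5 : i % 5 = 0) (hne : (i : Int) + 5 ≠ n)
    (j : Int) (hj : j = (i : Int) + 4) :
    (PySem.Int.mod (j + 1) 5 == 0 && (j + 1 != n)) = true := by
  subst hj
  rw [PySem.Int.mod_eq_emod_of_pos (by norm_num)]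
  have h0 : ((i : Int) + 4 + 1) % 5 = 0 := by omega
  have hne' : (i : Int) + 4 + 1 ≠ n := by omega
  simp [h0, hne']

-- when index+1 equals len(birthday_data) the second conjunct kills the divider
theorem pvCondEq (n j : Int) (heq : j + 1 = n) :
    (PySem.Int.mod (j + 1) 5 == 0 && (j + 1 != n)) = false := by
  have : (j + 1 != n) = false := by simp [heq]
  simp [this]

theorem pvMapSndCard (xs : List (String × String × String)) (s : Int) :
    (PySem.List.enumerate xs s).map (fun ip => pvCardA ip.2) = xs.map pvCardA := by
  induction xs generalizing s with
  | nil => simp [PySem.List.enumerate_nil]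
  | cons x t iht => simp [PySem.List.enumerate_cons, iht]

-- folding A's step over a segment in which no divider fires is plain concatenation
theorem pvFoldA_all_false (n : Int) (l : List (Int × (String × String × String))) (acc : String)
    (h : ∀ ip ∈ l, (PySem.Int.mod (ip.1 + 1) 5 == 0 && ip.1 + 1 != n) = false) :
    l.foldl (pvStepA n) acc = acc ++ PySem.Str.join "" (l.map (fun ip => pvCardA ip.2)) := by
  induction l generalizing acc with
  | nil => simp [PySem.Str.join, PySem.Chars.join_nil]
  | cons p t ihl =>
    simp only [List.foldl_cons, List.map_cons]
    rw [pvStepA_no n acc p (h p (by simp)), ihl _ (fun ip hip => h ip (by simp [hip]))]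
    apply String.toList_inj.mp
    simp [String.toList_append, PySem.Str.join, pvChars_join_nil_cons]

theorem pvLoop (len : Nat) : ∀ (xs : List (String × String × String)) (i : Nat) (acc : String) (n : Int),
    xs.length = len → i % 5 = 0 → n = (i : Int) + (xs.length : Int) →
    (PySem.List.enumerate xs (i : Int)).foldl (pvStepA n) acc = acc ++ pvRender (xs.map pvCardB) := by
  induction len using Nat.strong_induction_on with
  | _ len ih =>
    intro xs i acc n hlen h5 hn
    by_cases hle : xs.length ≤ 5
    · rw [pvFoldA_all_false]
      · rw [pvRender]
        have hml : (xs.map pvCardB).length ≤ 5 := by simpa using hle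
        rw [dif_pos hml]
        rw [pvCardB_eq, pvMapSndCard]
      · intro ip hip
        rw [PySem.List.mem_enumerate_iff] at hip
        obtain ⟨k, hk, rfl⟩ := hip
        by_cases hk5 : (k + 1) % 5 = 0
        · have hk4 : k = 4 := by omega
          have hlen5 : xs.length = 5 := by omega
          have heq : ((i : Int) + (k : Int), xs[k]).1 + 1 = n := by
            show (i : Int) + (k : Int) + 1 = n
            omega
          exact pvCondEq n _ heq
        · exact pvCondF i k n h5 hk5 _ rfl
    · rcases xs with _ | ⟨a, _ | ⟨b, _ | ⟨c, _ | ⟨d, _ | ⟨e, rest⟩⟩⟩⟩⟩ <;>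
        (try (exfalso; simp only [List.length_cons, List.length_nil] at hle; omega))
      have hrest : 1 ≤ rest.length := by simp only [List.length_cons] at hle; omega
      have hne5 : (i : Int) + 5 ≠ n := by
        rw [hn]; simp only [List.length_cons]; push_cast; omega
      simp only [PySem.List.enumerate_cons, List.foldl_cons]
      rw [pvStepA_no n _ ((i : Int), a) (pvCondF i 0 n h5 (by omega) (i : Int) (by norm_num)),
          pvStepA_no n _ ((i : Int) + 1, b)
            (pvCondF i 1 n h5 (by omega) ((i : Int) + 1) (by norm_num)),
          pvStepA_no n _ ((i : Int) + 1 + 1, c)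
            (pvCondF i 2 n h5 (by omega) ((i : Int) + 1 + 1) (by push_cast; ring)),
          pvStepA_no n _ ((i : Int) + 1 + 1 + 1, d)
            (pvCondF i 3 n h5 (by omega) ((i : Int) + 1 + 1 + 1) (by push_cast; ring)),
          pvStepA_yes n _ ((i : Int) + 1 + 1 + 1 + 1, e)
            (pvCondT i n h5 hne5 ((i : Int) + 1 + 1 + 1 + 1) (by ring))]
      have hstart : ((i : Int) + 1 + 1 + 1 + 1 + 1) = (((i + 5 : Nat)) : Int) := by push_cast; ring
      rw [hstart, ih rest.length (by simp at hlen ⊢; omega) rest (i + 5) _ n rfl (by omega)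
        (by rw [hn]; simp only [List.length_cons]; push_cast; ring)]
      conv_rhs => rw [pvRender]
      have hgt : ¬ ((a :: b :: c :: d :: e :: rest).map pvCardB).length ≤ 5 := by
        simp; omega
      rw [dif_neg hgt]
      simp only [List.map_cons, List.take_succ_cons, List.take_zero, List.drop_succ_cons,
        List.drop_zero]
      apply String.toList_inj.mp
      rw [pvCardB_eq]
      simp [String.toList_append, PySem.Str.join, pvChars_join_nil_cons, pvDividerA, pvDividerB]

-- ===== VERDICT (by name: the statement is the Claim_ definition above) =====
theorem generate_birthday_cards_spec : Claim_equal_generate_birthday_cards := by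
  intro bd _
  unfold Spec_generate_birthday_cards generate_birthday_cards generate_birthday_cards_alt
  have h := pvLoop bd.length bd 0 "" (bd.length : Int) rfl (by omega) (by push_cast; ring)
  simpa using h
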